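-- pv_equiv track=rewrite | github.com/jeff-901/leetcode | 1627/sol.py | areConnected
-- ===== SOURCE A (Python) =====
-- def areConnected(n, threshold, queries):
--     """
--     :type n: int
--     :type threshold: int
--     :type queries: List[List[int]]
--     :rtype: List[bool]
--     """
--     parents = [_ for _ in range(n+1)]
--     def find(idx):
--         if parents[idx] == idx:
--             return idx
--         parents[idx] = find(parents[idx])
--         return parents[idx]
--     for i in range(threshold+1, n):
--         if parents[i] != i: continue
--         for num in range(2*i, n+1, i):
--             i_p = find(i)
--             num_p = find(num)
--             if i_p != num_p:
--                 parents[i_p] = num_p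
--     ans = []
--     for a, b in queries:
--         ans.append(find(a) == find(b))
--     return ans
-- ===== SOURCE B (Python) =====
-- def areConnected(n, threshold, queries):
--     # connected components by label recoloring instead of a disjoint-set forest
--     comp = list(range(n + 1))
--     for i in range(threshold + 1, n):
--         for num in range(2 * i, n + 1, i):
--             ci, cn = comp[i], comp[num]
--             if ci != cn:
--                 comp = [ci if c == cn else c for c in comp]
--     return [comp[a] == comp[b] for a, b in queries]
-- ===== Notes on version B (the rewrite author's own statement) =====
-- stated objective: alternative
-- what changed: Replaces the recursive union-find forest with path compression (and its root-skip optimisation) by a flat component-label array that is recolored on every merge, answering queries by direct label comparison instead of two find traversals.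
-- outside the precondition, e.g. on areConnected(0, -1, [[0, 0]]): A returns [True], B returns [True]; on areConnected(2, 0, [[-1, 2]]): A returns [True], B returns [True]
import Mathlib
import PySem

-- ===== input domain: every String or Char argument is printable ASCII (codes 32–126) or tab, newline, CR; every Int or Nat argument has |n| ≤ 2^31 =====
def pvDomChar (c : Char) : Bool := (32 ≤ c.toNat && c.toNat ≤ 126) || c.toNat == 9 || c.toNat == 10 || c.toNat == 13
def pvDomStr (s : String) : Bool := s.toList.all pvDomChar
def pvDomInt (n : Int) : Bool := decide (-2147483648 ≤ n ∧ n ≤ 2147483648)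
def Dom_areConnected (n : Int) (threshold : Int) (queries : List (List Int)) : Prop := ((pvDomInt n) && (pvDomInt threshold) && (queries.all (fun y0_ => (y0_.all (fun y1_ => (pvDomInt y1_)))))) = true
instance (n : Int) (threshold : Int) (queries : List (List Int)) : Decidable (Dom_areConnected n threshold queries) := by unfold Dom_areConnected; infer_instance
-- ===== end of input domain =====

-- B replaces A's recursive union-find forest by component-label recoloring; equivalence on in-range
-- queries with nonnegative threshold is proved (A mutates nothing observable; both are pure).

-- ===== PORT A =====
-- recursive `find` with path compression; fuel = len(parents) always suffices inside Pre_
def findA : Nat → List Int → Int → Int × List Int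
  | 0, ps, idx => (idx, ps)
  | Nat.succ f, ps, idx =>
    match PySem.List.pyGet? ps idx with
    | none => (idx, ps)            -- IndexError in Python: outside Pre_
    | some v =>
      if v = idx then (idx, ps)
      else
        let r := findA f ps v
        (r.1, PySem.List.pySetD r.2 idx r.1)

-- the body of the inner `for num in range(2*i, n+1, i)` loop
def unionStepA (fuel : Nat) (i : Int) (ps : List Int) (num : Int) : List Int :=
  let fi := findA fuel ps i
  let fn := findA fuel fi.2 num
  if fi.1 ≠ fn.1 then PySem.List.pySetD fn.2 fi.1 fn.1 else fn.2

-- one step of the outer `for i in range(threshold+1, n)` loop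
def baseStepA (fuel : Nat) (n : Int) (ps : List Int) (i : Int) : List Int :=
  match PySem.List.pyGet? ps i with
  | none => ps                   -- IndexError in Python: outside Pre_
  | some v =>
    if v ≠ i then ps             -- `continue`
    else (PySem.List.pyRange (2*i) (n+1) i).foldl (unionStepA fuel i) ps

-- one step of the `for a, b in queries` loop
def queryStepA (fuel : Nat) (st : List Int × List Bool) (q : List Int) : List Int × List Bool :=
  match q with
  | [a, b] =>
    let fa := findA fuel st.1 a
    let fb := findA fuel fa.2 b
    (fb.2, st.2 ++ [decide (fa.1 = fb.1)])
  | _ => (st.1, st.2 ++ [false]) -- ValueError in Python: outside Pre_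

def areConnected (n : Int) (threshold : Int) (queries : List (List Int)) : List Bool :=
  let ps0 := PySem.List.pyRange 0 (n+1) 1
  let fuel := ps0.length
  let ps1 := (PySem.List.pyRange (threshold+1) n 1).foldl (baseStepA fuel n) ps0
  (queries.foldl (queryStepA fuel) (ps1, ([] : List Bool))).2

-- ===== PORT B =====
-- body of the inner `for num in range(2*i, n+1, i)` loop: recolor the class of num
def recolorStepB (i : Int) (comp : List Int) (num : Int) : List Int :=
  let ci := PySem.List.pyGetD comp i 0
  let cn := PySem.List.pyGetD comp num 0
  if ci ≠ cn then comp.map (fun c => if c = cn then ci else c) else comp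

-- body of the answer comprehension `comp[a] == comp[b] for a, b in queries`
def answerB (comp : List Int) (q : List Int) : Bool :=
  match q with
  | [a, b] => decide (PySem.List.pyGetD comp a 0 = PySem.List.pyGetD comp b 0)
  | _ => false   -- ValueError in Python: outside Pre_

def areConnected_alt (n : Int) (threshold : Int) (queries : List (List Int)) : List Bool :=
  let comp0 := PySem.List.pyRange 0 (n+1) 1
  let comp := (PySem.List.pyRange (threshold+1) n 1).foldl (fun comp i =>
      (PySem.List.pyRange (2*i) (n+1) i).foldl (recolorStepB i) comp) comp0
  queries.map (answerB comp)

-- ===== PRECONDITION & SPEC =====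
-- Pre_ excludes: negative thresholds (for most of them A raises ValueError `range() arg 3 must not
-- be zero` or IndexError; the few that return are degenerate n ≤ 0 corners), queries that are not
-- pairs (ValueError), and query endpoints outside 0..n (IndexError for out-of-range ones; endpoints
-- in -(n+1)..-1 return by Python's accidental negative-index wraparound, which both programs share).
def Pre_areConnected (n : Int) (threshold : Int) (queries : List (List Int)) : Prop :=
  0 ≤ threshold ∧ ∀ q ∈ queries, q.length = 2 ∧ ∀ x ∈ q, 0 ≤ x ∧ x ≤ n
instance (n : Int) (threshold : Int) (queries : List (List Int)) : Decidable (Pre_areConnected n threshold queries) := by unfold Pre_areConnected; infer_instance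

def pvWitness_areConnected : Int × Int × List (List Int) := (6, 1, [[1, 4], [2, 5], [3, 6], [4, 6]])

def Spec_areConnected (n : Int) (threshold : Int) (queries : List (List Int)) (out : List Bool) : Prop := out = areConnected_alt n threshold queries
instance (n : Int) (threshold : Int) (queries : List (List Int)) (out : List Bool) : Decidable (Spec_areConnected n threshold queries out) := by unfold Spec_areConnected; infer_instance

-- ===== CLAIM (what is proved, stated in full; the proofs are below) =====
def Claim_equal_areConnected : Prop := ∀ (n : Int) (threshold : Int) (queries : List (List Int)), Dom_areConnected n threshold queries → Pre_areConnected n threshold queries → Spec_areConnected n threshold queries (areConnected n threshold queries)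

-- ===== LEMMAS AND PROOFS =====
-- ---- abstract view of A's parent forest ----
def pstep (ps : List Int) (v : Int) : Int := (PySem.List.pyGet? ps v).getD v
def IsRootP (ps : List Int) (v : Int) : Prop := PySem.List.pyGet? ps v = some v
def ReachP (ps : List Int) (v r : Int) : Prop := ∃ t : Nat, (pstep ps)^[t] v = r ∧ IsRootP ps r
def SameC (ps : List Int) (u v : Int) : Prop := ∃ r, ReachP ps u r ∧ ReachP ps v r
def InRg (n v : Int) : Prop := 0 ≤ v ∧ v ≤ n

def InvA (n : Int) (ps : List Int) : Prop :=
  ps.length = (n+1).toNat ∧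
  (∀ v, InRg n v → ∃ w, PySem.List.pyGet? ps v = some w ∧ InRg n w) ∧
  (∀ v, InRg n v → ∃ r, ReachP ps v r)

def Pdiv (threshold bound v : Int) : Prop := ∃ j, threshold < j ∧ j < bound ∧ j ∣ v

def PInvA (n threshold bound : Int) (ps : List Int) : Prop :=
  ∀ v, InRg n v → ¬ IsRootP ps v → Pdiv threshold bound v ∧ Pdiv threshold bound (pstep ps v)

def MInvB (n threshold bound : Int) (comp : List Int) : Prop :=
  ∀ j m, threshold < j → j < bound → j ∣ m → 2*j ≤ m → m ≤ n →
    PySem.List.pyGetD comp j 0 = PySem.List.pyGetD comp m 0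

def RelAB (n : Int) (ps comp : List Int) : Prop :=
  ∀ u v, InRg n u → InRg n v →
    (SameC ps u v ↔ PySem.List.pyGetD comp u 0 = PySem.List.pyGetD comp v 0)

-- ---- generic facts about the step function ----
theorem iterate_fixed (f : Int → Int) (r : Int) (hr : f r = r) : ∀ t, f^[t] r = r := by
  intro t; induction t with
  | zero => rfl
  | succ t ih => rw [Function.iterate_succ_apply, hr, ih]

theorem isRootP_pstep {ps : List Int} {r : Int} (h : IsRootP ps r) : pstep ps r = r := by
  unfold IsRootP at h; simp [pstep, h]

theorem reach_ge {ps : List Int} {v r : Int} {t1 : Nat} (he : (pstep ps)^[t1] v = r)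
    (hr : IsRootP ps r) {t2 : Nat} (h : t1 ≤ t2) : (pstep ps)^[t2] v = r := by
  have : t2 = (t2 - t1) + t1 := by omega
  rw [this, Function.iterate_add_apply, he, iterate_fixed _ _ (isRootP_pstep hr)]

theorem reach_unique {ps : List Int} {v r1 r2 : Int}
    (h1 : ReachP ps v r1) (h2 : ReachP ps v r2) : r1 = r2 := by
  obtain ⟨t1, he1, hr1⟩ := h1
  obtain ⟨t2, he2, hr2⟩ := h2
  rcases le_total t1 t2 with h | h
  · rw [← reach_ge he1 hr1 h, he2]
  · rw [← reach_ge he2 hr2 h, he1]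

theorem reach_step {ps : List Int} {v r : Int} (h : ReachP ps (pstep ps v) r) : ReachP ps v r := by
  obtain ⟨t, he, hr⟩ := h
  exact ⟨t + 1, by rw [Function.iterate_succ_apply]; exact he, hr⟩

theorem reach_root {ps : List Int} {v r : Int} (h : ReachP ps v r) : IsRootP ps r := by
  obtain ⟨t, _, hr⟩ := h; exact hr

theorem reach_self {ps : List Int} {r : Int} (h : IsRootP ps r) : ReachP ps r r := ⟨0, rfl, h⟩

theorem sameC_iff_roots {ps : List Int} {u v ru rv : Int}
    (hu : ReachP ps u ru) (hv : ReachP ps v rv) : SameC ps u v ↔ ru = rv := by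
  constructor
  · rintro ⟨r, h1, h2⟩
    rw [← reach_unique h1 hu, ← reach_unique h2 hv]
  · intro h; exact ⟨ru, hu, h ▸ hv⟩

-- closure: iterates stay in range
theorem pstep_InRg {n : Int} {ps : List Int} (hcl : ∀ v, InRg n v → ∃ w, PySem.List.pyGet? ps v = some w ∧ InRg n w)
    {v : Int} (hv : InRg n v) : InRg n (pstep ps v) := by
  obtain ⟨w, hw, hwr⟩ := hcl v hv
  simpa [pstep, hw] using hwr

theorem iterate_InRg {n : Int} {ps : List Int} (hcl : ∀ v, InRg n v → ∃ w, PySem.List.pyGet? ps v = some w ∧ InRg n w)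
    {v : Int} (hv : InRg n v) : ∀ t, InRg n ((pstep ps)^[t] v) := by
  intro t; induction t generalizing v with
  | zero => exact hv
  | succ t ih => rw [Function.iterate_succ_apply]; exact ih (pstep_InRg hcl hv)

theorem reach_InRg {n : Int} {ps : List Int} (hInv : InvA n ps)
    {v r : Int} (hv : InRg n v) (h : ReachP ps v r) : InRg n r := by
  obtain ⟨t, he, _⟩ := h
  exact he ▸ iterate_InRg hInv.2.1 hv t

-- a root can be reached within n steps (distinct iterates live in [0, n])
theorem reach_time_lt {n : Int} {ps : List Int} (hInv : InvA n ps)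
    {v : Int} (hv : InRg n v) :
    ∃ (t : Nat) (r : Int), (pstep ps)^[t] v = r ∧ IsRootP ps r ∧ t < (n+1).toNat := by
  obtain ⟨r1, t1, he1, hr1⟩ := hInv.2.2 v hv
  have hP : ∃ t, IsRootP ps ((pstep ps)^[t] v) := ⟨t1, he1 ▸ hr1⟩
  classical
  let t0 := Nat.find hP
  have ht0 : IsRootP ps ((pstep ps)^[t0] v) := Nat.find_spec hP
  have hmin : ∀ s, s < t0 → ¬ IsRootP ps ((pstep ps)^[s] v) := fun s hs => Nat.find_min hP hs
  have hinj : Set.InjOn (fun k => (pstep ps)^[k] v) (Finset.range (t0+1)) := by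
    intro a ha b hb hab
    simp only [Finset.coe_range, Set.mem_Iio] at ha hb
    simp only at hab
    by_contra hne
    rcases Nat.lt_or_ge a b with h | h
    · -- a < b ≤ t0 : iterate at t0-(b-a) is already a root, contradicting minimality
      have hroot : IsRootP ps ((pstep ps)^[t0 - (b - a)] v) := by
        have : (pstep ps)^[t0 - (b - a)] v = (pstep ps)^[t0] v := by
          have h1 : t0 - (b - a) = (t0 - b) + a := by omega
          have h2 : t0 = (t0 - b) + b := by omega
          rw [h1, Function.iterate_add_apply, hab, ← Function.iterate_add_apply, ← h2]
        rw [this]; exact ht0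
      exact hmin _ (by omega) hroot
    · have hlt : b < a := by omega
      have hroot : IsRootP ps ((pstep ps)^[t0 - (a - b)] v) := by
        have : (pstep ps)^[t0 - (a - b)] v = (pstep ps)^[t0] v := by
          have h1 : t0 - (a - b) = (t0 - a) + b := by omega
          have h2 : t0 = (t0 - a) + a := by omega
          rw [h1, Function.iterate_add_apply, ← hab, ← Function.iterate_add_apply, ← h2]
        rw [this]; exact ht0
      exact hmin _ (by omega) hroot
  have hmaps : ∀ k ∈ Finset.range (t0+1), (pstep ps)^[k] v ∈ Finset.Icc (0:Int) n := by
    intro k _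
    have := iterate_InRg hInv.2.1 hv k
    simpa [InRg, Finset.mem_Icc] using this
  have hcard := Finset.card_le_card_of_injOn _ hmaps hinj
  have hIcc : (Finset.Icc (0:Int) n).card = (n+1).toNat := by
    rw [Int.card_Icc]; norm_num
  rw [Finset.card_range, hIcc] at hcard
  exact ⟨t0, (pstep ps)^[t0] v, rfl, ht0, by omega⟩

-- ---- updates to the list seen through pyGet? ----
theorem pyGet?_pySetD_self {ps : List Int} {idx : Int} (r : Int)
    (h0 : 0 ≤ idx) (h1 : idx < (ps.length : Int)) :
    PySem.List.pyGet? (PySem.List.pySetD ps idx r) idx = some r := by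
  rw [PySem.List.pySetD_of_nonneg _ _ h0, PySem.List.pyGet?_of_nonneg _ h0]
  have hlt : idx.toNat < ps.length := by omega
  rw [List.getElem?_set]
  simp [hlt]

theorem pyGet?_pySetD_ne {ps : List Int} {idx x : Int} (r : Int)
    (h0 : 0 ≤ idx) (hx : 0 ≤ x) (hne : x ≠ idx) :
    PySem.List.pyGet? (PySem.List.pySetD ps idx r) x = PySem.List.pyGet? ps x := by
  rw [PySem.List.pySetD_of_nonneg _ _ h0, PySem.List.pyGet?_of_nonneg _ hx,
      PySem.List.pyGet?_of_nonneg _ hx, List.getElem?_set]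
  rw [if_neg (by omega)]

-- the last pointer on a path into a root comes from a non-root
theorem reach_last_step {n : Int} {ps : List Int} (hInv : InvA n ps) :
    ∀ (t : Nat) (v r : Int), InRg n v → ¬ IsRootP ps v → (pstep ps)^[t] v = r → IsRootP ps r →
    ∃ w, InRg n w ∧ ¬ IsRootP ps w ∧ pstep ps w = r := by
  intro t
  induction t with
  | zero =>
    intro v r hv hnr he hr
    simp only [Function.iterate_zero_apply] at he
    exact absurd (he ▸ hr) hnr
  | succ t ih =>
    intro v r hv hnr he hr
    rw [Function.iterate_succ_apply] at he
    have hw : InRg n (pstep ps v) := pstep_InRg hInv.2.1 hv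
    by_cases hroot : IsRootP ps (pstep ps v)
    · have : (pstep ps)^[t] (pstep ps v) = pstep ps v := iterate_fixed _ _ (isRootP_pstep hroot) t
      exact ⟨v, hv, hnr, by rw [← he, this]⟩
    · exact ih (pstep ps v) r hw hroot he hr

-- ---- path compression: pointing a non-root directly at its root changes nothing observable ----
theorem redirect_facts {n : Int} {ps : List Int} {idx r : Int} (threshold : Int)
    (hInv : InvA n ps) (hidx : InRg n idx) (hnr : ¬ IsRootP ps idx) (hr : ReachP ps idx r) :
    InvA n (PySem.List.pySetD ps idx r) ∧
    (PySem.List.pySetD ps idx r).length = ps.length ∧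
    (∀ v, InRg n v → ∀ rr, (ReachP (PySem.List.pySetD ps idx r) v rr ↔ ReachP ps v rr)) ∧
    (∀ x, InRg n x → (IsRootP (PySem.List.pySetD ps idx r) x ↔ IsRootP ps x)) ∧
    (∀ bound, PInvA n threshold bound ps → PInvA n threshold bound (PySem.List.pySetD ps idx r)) := by
  set ps' := PySem.List.pySetD ps idx r with hps'
  have hrroot : IsRootP ps r := reach_root hr
  have hrrg : InRg n r := reach_InRg hInv hidx hr
  have hrne : r ≠ idx := by
    intro h; exact hnr (h ▸ hrroot)
  have hlen : ps'.length = ps.length := PySem.List.length_pySetD _ _ _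
  have hidxlt : idx < (ps.length : Int) := by
    have h1 := hInv.1; have h2 := hidx.2; omega
  have hget_idx : PySem.List.pyGet? ps' idx = some r := pyGet?_pySetD_self r hidx.1 hidxlt
  have hget_ne : ∀ x, 0 ≤ x → x ≠ idx → PySem.List.pyGet? ps' x = PySem.List.pyGet? ps x :=
    fun x hx hne => pyGet?_pySetD_ne r hidx.1 hx hne
  have hstep_idx : pstep ps' idx = r := by simp [pstep, hget_idx]
  have hstep_ne : ∀ x, 0 ≤ x → x ≠ idx → pstep ps' x = pstep ps x := by
    intro x hx hne; simp [pstep, hget_ne x hx hne]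
  have hroot_iff : ∀ x, InRg n x → (IsRootP ps' x ↔ IsRootP ps x) := by
    intro x hx
    by_cases hxi : x = idx
    · subst hxi
      simp only [IsRootP, hget_idx]
      constructor
      · intro h; exact absurd (Option.some.inj h) hrne
      · intro h; exact absurd h hnr
    · simp only [IsRootP, hget_ne x hx.1 hxi]
  have hcl' : ∀ v, InRg n v → ∃ w, PySem.List.pyGet? ps' v = some w ∧ InRg n w := by
    intro v hv
    by_cases hvi : v = idx
    · exact ⟨r, hvi ▸ hget_idx, hrrg⟩
    · obtain ⟨w, hw, hwr⟩ := hInv.2.1 v hv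
      exact ⟨w, (hget_ne v hv.1 hvi) ▸ hw, hwr⟩
  have fwd : ∀ (t : Nat) (v rr : Int), InRg n v → (pstep ps)^[t] v = rr → IsRootP ps rr →
      ReachP ps' v rr := by
    intro t
    induction t with
    | zero =>
      intro v rr hv he hrr
      simp only [Function.iterate_zero_apply] at he
      subst he
      have : v ≠ idx := fun h => hnr (h ▸ hrr)
      exact reach_self ((hroot_iff v hv).mpr hrr)
    | succ t ih =>
      intro v rr hv he hrr
      rw [Function.iterate_succ_apply] at he
      by_cases hvi : v = idx
      · subst hvi
        have hreq : rr = r := reach_unique ⟨t+1, by rw [Function.iterate_succ_apply]; exact he, hrr⟩ hr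
        subst hreq
        exact ⟨1, by simpa using hstep_idx, (hroot_iff _ hrrg).mpr hrroot⟩
      · have hw : InRg n (pstep ps v) := pstep_InRg hInv.2.1 hv
        have := ih (pstep ps v) rr hw he hrr
        rw [← hstep_ne v hv.1 hvi] at this
        exact reach_step this
  have bwd : ∀ (t : Nat) (v rr : Int), InRg n v → (pstep ps')^[t] v = rr → IsRootP ps' rr →
      ReachP ps v rr := by
    intro t
    induction t with
    | zero =>
      intro v rr hv he hrr
      simp only [Function.iterate_zero_apply] at he
      subst he
      exact reach_self ((hroot_iff v hv).mp hrr)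
    | succ t ih =>
      intro v rr hv he hrr
      rw [Function.iterate_succ_apply] at he
      by_cases hvi : v = idx
      · subst hvi
        rw [hstep_idx] at he
        have hrroot' : IsRootP ps' r := (hroot_iff r hrrg).mpr hrroot
        have : rr = r := by rw [← he, iterate_fixed _ _ (isRootP_pstep hrroot')]
        subst this; exact hr
      · have hw : InRg n (pstep ps' v) := pstep_InRg hcl' hv
        have hsame := hstep_ne v hv.1 hvi
        have := ih (pstep ps' v) rr hw he hrr
        rw [hsame] at this
        exact reach_step this
  have hreach_iff : ∀ v, InRg n v → ∀ rr, (ReachP ps' v rr ↔ ReachP ps v rr) := by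
    intro v hv rr
    constructor
    · rintro ⟨t, he, hrr⟩; exact bwd t v rr hv he hrr
    · rintro ⟨t, he, hrr⟩; exact fwd t v rr hv he hrr
  refine ⟨⟨by rw [hlen]; exact hInv.1, hcl', ?_⟩, hlen, hreach_iff, hroot_iff, ?_⟩
  · intro v hv
    obtain ⟨rv, hrv⟩ := hInv.2.2 v hv
    exact ⟨rv, (hreach_iff v hv rv).mpr hrv⟩
  · intro bound hP v hv hnr'
    by_cases hvi : v = idx
    · subst hvi
      have h1 := hP _ hidx hnr
      rw [hstep_idx]
      refine ⟨h1.1, ?_⟩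
      obtain ⟨t, he, hrr⟩ := hr
      obtain ⟨w, hwrg, hwnr, hwst⟩ := reach_last_step hInv t _ _ hidx hnr he hrr
      exact hwst ▸ (hP w hwrg hwnr).2
    · have hnrold : ¬ IsRootP ps v := fun h => hnr' ((hroot_iff v hv).mpr h)
      have h1 := hP v hv hnrold
      rw [hstep_ne v hv.1 hvi]
      exact h1

-- ---- union: reparenting root rA onto root rB merges exactly the two classes ----
theorem reroot_facts {n : Int} {ps : List Int} {rA rB : Int}
    (hInv : InvA n ps) (hA : InRg n rA) (hB : InRg n rB)
    (hrA : IsRootP ps rA) (hrB : IsRootP ps rB) (hne : rA ≠ rB) :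
    InvA n (PySem.List.pySetD ps rA rB) ∧
    (PySem.List.pySetD ps rA rB).length = ps.length ∧
    (∀ v rr, InRg n v → (ReachP (PySem.List.pySetD ps rA rB) v rr ↔
        ∃ r0, ReachP ps v r0 ∧ rr = if r0 = rA then rB else r0)) ∧
    (¬ IsRootP (PySem.List.pySetD ps rA rB) rA) ∧
    (∀ x, InRg n x → x ≠ rA → (IsRootP (PySem.List.pySetD ps rA rB) x ↔ IsRootP ps x)) ∧
    pstep (PySem.List.pySetD ps rA rB) rA = rB ∧
    (∀ x, 0 ≤ x → x ≠ rA → pstep (PySem.List.pySetD ps rA rB) x = pstep ps x) := by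
  set ps' := PySem.List.pySetD ps rA rB with hps'
  have hlen : ps'.length = ps.length := PySem.List.length_pySetD _ _ _
  have hidxlt : rA < (ps.length : Int) := by have h1 := hInv.1; have h2 := hA.2; omega
  have hget_idx : PySem.List.pyGet? ps' rA = some rB := pyGet?_pySetD_self rB hA.1 hidxlt
  have hget_ne : ∀ x, 0 ≤ x → x ≠ rA → PySem.List.pyGet? ps' x = PySem.List.pyGet? ps x :=
    fun x hx hxe => pyGet?_pySetD_ne rB hA.1 hx hxe
  have hstep_idx : pstep ps' rA = rB := by simp [pstep, hget_idx]
  have hstep_ne : ∀ x, 0 ≤ x → x ≠ rA → pstep ps' x = pstep ps x := by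
    intro x hx hxe; simp [pstep, hget_ne x hx hxe]
  have hrB' : IsRootP ps' rB := by
    simpa only [IsRootP, hget_ne rB hB.1 (Ne.symm hne)] using hrB
  have hcl' : ∀ v, InRg n v → ∃ w, PySem.List.pyGet? ps' v = some w ∧ InRg n w := by
    intro v hv
    by_cases hvi : v = rA
    · exact ⟨rB, hvi ▸ hget_idx, hB⟩
    · obtain ⟨w, hw, hwr⟩ := hInv.2.1 v hv
      exact ⟨w, (hget_ne v hv.1 hvi) ▸ hw, hwr⟩
  have hroot' : ∀ x, InRg n x → x ≠ rA → (IsRootP ps' x ↔ IsRootP ps x) := by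
    intro x hx hxe; simp only [IsRootP, hget_ne x hx.1 hxe]
  have fwd : ∀ (t : Nat) (v rr : Int), InRg n v → (pstep ps')^[t] v = rr → IsRootP ps' rr →
      ∃ r0, ReachP ps v r0 ∧ rr = if r0 = rA then rB else r0 := by
    intro t
    induction t with
    | zero =>
      intro v rr hv he hrr
      simp only [Function.iterate_zero_apply] at he
      subst he
      have hvne : v ≠ rA := by
        intro h; subst h
        simp only [IsRootP, hget_idx] at hrr
        exact hne (Option.some.inj hrr).symm
      exact ⟨v, reach_self ((hroot' v hv hvne).mp hrr), by rw [if_neg hvne]⟩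
    | succ t ih =>
      intro v rr hv he hrr
      rw [Function.iterate_succ_apply] at he
      by_cases hvi : v = rA
      · subst hvi
        rw [hstep_idx] at he
        have : rr = rB := by rw [← he, iterate_fixed _ _ (isRootP_pstep hrB')]
        subst this
        exact ⟨_, reach_self hrA, by rw [if_pos rfl]⟩
      · have hw : InRg n (pstep ps' v) := pstep_InRg hcl' hv
        obtain ⟨r0, hr0, hrr0⟩ := ih (pstep ps' v) rr hw he hrr
        rw [hstep_ne v hv.1 hvi] at hr0
        exact ⟨r0, reach_step hr0, hrr0⟩
  have bwd0 : ∀ (t : Nat) (v r0 : Int), InRg n v → (pstep ps)^[t] v = r0 → IsRootP ps r0 →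
      ReachP ps' v (if r0 = rA then rB else r0) := by
    intro t
    induction t with
    | zero =>
      intro v r0 hv he hr0
      simp only [Function.iterate_zero_apply] at he
      subst he
      by_cases hvi : v = rA
      · subst hvi
        rw [if_pos rfl]
        exact ⟨1, by simpa using hstep_idx, hrB'⟩
      · rw [if_neg hvi]
        exact reach_self ((hroot' v hv hvi).mpr hr0)
    | succ t ih =>
      intro v r0 hv he hr0
      rw [Function.iterate_succ_apply] at he
      by_cases hvroot : IsRootP ps v
      · have : (pstep ps)^[t] (pstep ps v) = v := by
          rw [isRootP_pstep hvroot, iterate_fixed _ _ (isRootP_pstep hvroot)]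
        have hv0 : r0 = v := by rw [← he, this]
        subst hv0
        by_cases hvi : r0 = rA
        · subst hvi
          rw [if_pos rfl]
          exact ⟨1, by simpa using hstep_idx, hrB'⟩
        · rw [if_neg hvi]
          exact reach_self ((hroot' r0 hv hvi).mpr hvroot)
      · have hvne : v ≠ rA := by intro h; exact hvroot (h ▸ hrA)
        have hw : InRg n (pstep ps v) := pstep_InRg hInv.2.1 hv
        have := ih (pstep ps v) r0 hw he hr0
        rw [← hstep_ne v hv.1 hvne] at this
        exact reach_step this
  have hreach_iff : ∀ v rr, InRg n v → (ReachP ps' v rr ↔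
      ∃ r0, ReachP ps v r0 ∧ rr = if r0 = rA then rB else r0) := by
    intro v rr hv
    constructor
    · rintro ⟨t, he, hrr⟩; exact fwd t v rr hv he hrr
    · rintro ⟨r0, ⟨t, he, hr0⟩, hrr⟩
      subst hrr
      exact bwd0 t v r0 hv he hr0
  have hnotroot : ¬ IsRootP ps' rA := by
    intro h
    rw [IsRootP, hget_idx] at h
    exact hne (Option.some.inj h).symm
  refine ⟨⟨by rw [hlen]; exact hInv.1, hcl', ?_⟩, hlen, hreach_iff, hnotroot, hroot', hstep_idx, hstep_ne⟩
  intro v hv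
  obtain ⟨rv, hrv⟩ := hInv.2.2 v hv
  exact ⟨if rv = rA then rB else rv, (hreach_iff v _ hv).mpr ⟨rv, hrv, rfl⟩⟩

-- ---- the recursive find: returns the root, compresses, changes nothing observable ----
theorem findA_main (n threshold : Int) :
    ∀ (fuel t : Nat) (ps : List Int) (idx r : Int),
    InvA n ps → InRg n idx → (pstep ps)^[t] idx = r → IsRootP ps r → t < fuel →
    (findA fuel ps idx).1 = r ∧
    InvA n (findA fuel ps idx).2 ∧
    (findA fuel ps idx).2.length = ps.length ∧
    (∀ v, InRg n v → ∀ rr, (ReachP (findA fuel ps idx).2 v rr ↔ ReachP ps v rr)) ∧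
    (∀ x, InRg n x → (IsRootP (findA fuel ps idx).2 x ↔ IsRootP ps x)) ∧
    (∀ bound, PInvA n threshold bound ps → PInvA n threshold bound (findA fuel ps idx).2) := by
  intro fuel
  induction fuel with
  | zero => intro t ps idx r _ _ _ _ h; omega
  | succ f ih =>
    intro t ps idx r hInv hidx he hr ht
    obtain ⟨w, hw, hwr⟩ := hInv.2.1 idx hidx
    by_cases hwi : w = idx
    · -- idx is a root: find returns it unchanged
      subst hwi
      have hroot : IsRootP ps w := hw
      have hr_eq : r = w := reach_unique ⟨t, he, hr⟩ (reach_self hroot)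
      subst hr_eq
      simp only [findA, hw]
      exact ⟨rfl, hInv, rfl, fun v _ rr => Iff.rfl, fun x _ => Iff.rfl, fun _ h => h⟩
    · -- follow the parent pointer
      have hnr : ¬ IsRootP ps idx := by
        intro h; rw [IsRootP] at h; rw [h] at hw; exact hwi (Option.some.inj hw).symm
      have hstep : pstep ps idx = w := by simp [pstep, hw]
      have ht1 : 1 ≤ t := by
        rcases Nat.eq_zero_or_pos t with h0 | h0
        · subst h0; simp only [Function.iterate_zero_apply] at he; exact absurd (he ▸ hr) hnr
        · omega
      have he' : (pstep ps)^[t-1] w = r := by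
        have : t = (t - 1) + 1 := by omega
        rw [this, Function.iterate_succ_apply, hstep] at he
        exact he
      have hrec := ih (t-1) ps w r hInv hwr he' hr (by omega)
      obtain ⟨hr1, hInv1, hlen1, hreach1, hroot1, hP1⟩ := hrec
      set rec := findA f ps w with hrec_def
      -- now the compression write at idx
      have hnr1 : ¬ IsRootP rec.2 idx := fun h => hnr ((hroot1 idx hidx).mp h)
      have hreach_idx : ReachP rec.2 idx r := (hreach1 idx hidx r).mpr ⟨t, he, hr⟩
      have hred := redirect_facts (n := n) (ps := rec.2) (idx := idx) (r := r) threshold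
        hInv1 hidx hnr1 hreach_idx
      obtain ⟨hInv2, hlen2, hreach2, hroot2, hP2⟩ := hred
      have hres : findA (f+1) ps idx = (r, PySem.List.pySetD rec.2 idx r) := by
        simp only [findA, hw, if_neg hwi]
        exact congrArg (fun x => (x, PySem.List.pySetD rec.2 idx x)) hr1
      rw [hres]
      refine ⟨rfl, hInv2, by rw [hlen2, hlen1], ?_, ?_, ?_⟩
      · intro v hv rr
        exact (hreach2 v hv rr).trans (hreach1 v hv rr)
      · intro x hx
        exact (hroot2 x hx).trans (hroot1 x hx)
      · intro bound hP
        exact hP2 bound (hP1 bound hP)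

-- convenience form: with fuel (n+1).toNat, find simply works
theorem findA_full {n : Int} (threshold : Int) {fuel : Nat} {ps : List Int} {idx : Int}
    (hfuel : fuel = (n+1).toNat) (hInv : InvA n ps) (hidx : InRg n idx) :
    ReachP ps idx (findA fuel ps idx).1 ∧
    InvA n (findA fuel ps idx).2 ∧
    (findA fuel ps idx).2.length = ps.length ∧
    (∀ v, InRg n v → ∀ rr, (ReachP (findA fuel ps idx).2 v rr ↔ ReachP ps v rr)) ∧
    (∀ x, InRg n x → (IsRootP (findA fuel ps idx).2 x ↔ IsRootP ps x)) ∧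
    (∀ bound, PInvA n threshold bound ps → PInvA n threshold bound (findA fuel ps idx).2) := by
  obtain ⟨t, r, he, hr, ht⟩ := reach_time_lt hInv hidx
  have h := findA_main n threshold fuel t ps idx r hInv hidx he hr (by omega)
  exact ⟨h.1 ▸ ⟨t, he, hr⟩, h.2⟩

-- ---- transfers and small arithmetic helpers ----
theorem sameC_transfer {n : Int} {ps1 ps2 : List Int}
    (h : ∀ v, InRg n v → ∀ rr, (ReachP ps2 v rr ↔ ReachP ps1 v rr))
    {u v : Int} (hu : InRg n u) (hv : InRg n v) : SameC ps2 u v ↔ SameC ps1 u v :=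
  exists_congr fun r => and_congr (h u hu r) (h v hv r)

theorem relAB_transfer {n : Int} {ps1 ps2 comp : List Int}
    (h : ∀ v, InRg n v → ∀ rr, (ReachP ps2 v rr ↔ ReachP ps1 v rr))
    (hRel : RelAB n ps1 comp) : RelAB n ps2 comp := by
  intro u v hu hv
  rw [sameC_transfer h hu hv]
  exact hRel u v hu hv

theorem squash_iff (K V a b : Int) :
    ((if a = K then V else a) = (if b = K then V else b)) ↔
      (a = b ∨ (a = K ∧ b = V) ∨ (a = V ∧ b = K)) := by
  split_ifs <;> omega

theorem pyGetD_map_read (comp : List Int) (f : Int → Int) {x : Int}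
    (h0 : 0 ≤ x) (hx : x < (comp.length : Int)) :
    PySem.List.pyGetD (comp.map f) x 0 = f (PySem.List.pyGetD comp x 0) := by
  have hx' : x < ((comp.map f).length : Int) := by simpa using hx
  rw [PySem.List.pyGetD_eq_getElem _ _ h0 hx', PySem.List.pyGetD_eq_getElem _ _ h0 hx,
      List.getElem_map]

-- ---- one edge (i, num) processed in lockstep by both programs ----
theorem edge_step {n threshold : Int} {fuel : Nat} {i num : Int} {ps comp : List Int}
    (hfuel : fuel = (n+1).toNat)
    (hthr : 0 ≤ threshold) (hi1 : threshold < i) (hin : i < n)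
    (hdvd : i ∣ num) (h2i : 2*i ≤ num) (hnum : num ≤ n)
    (hInv : InvA n ps) (hPI : PInvA n threshold (i+1) ps)
    (hclen : comp.length = (n+1).toNat)
    (hRel : RelAB n ps comp) :
    InvA n (unionStepA fuel i ps num) ∧
    PInvA n threshold (i+1) (unionStepA fuel i ps num) ∧
    (unionStepA fuel i ps num).length = ps.length ∧
    (recolorStepB i comp num).length = (n+1).toNat ∧
    RelAB n (unionStepA fuel i ps num) (recolorStepB i comp num) ∧
    (∀ u v, InRg n u → InRg n v → PySem.List.pyGetD comp u 0 = PySem.List.pyGetD comp v 0 →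
       PySem.List.pyGetD (recolorStepB i comp num) u 0 = PySem.List.pyGetD (recolorStepB i comp num) v 0) ∧
    PySem.List.pyGetD (recolorStepB i comp num) i 0 = PySem.List.pyGetD (recolorStepB i comp num) num 0 := by
  have hirg : InRg n i := ⟨by omega, by omega⟩
  have hnumrg : InRg n num := ⟨by omega, hnum⟩
  obtain ⟨hfa_r, hfa_inv, hfa_len, hfa_reach, hfa_root, hfa_pi⟩ :=
    findA_full (n := n) threshold hfuel hInv hirg
  set fa := findA fuel ps i with hfa_def
  obtain ⟨hfb_r, hfb_inv, hfb_len, hfb_reach, hfb_root, hfb_pi⟩ :=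
    findA_full (n := n) threshold hfuel hfa_inv hnumrg
  set fb := findA fuel fa.2 num with hfb_def
  set ri := fa.1 with hri_def
  set rm := fb.1 with hrm_def
  have hreach_i : ReachP ps i ri := hfa_r
  have hreach_num : ReachP ps num rm := (hfa_reach num hnumrg rm).mp hfb_r
  have hri_rg : InRg n ri := reach_InRg hInv hirg hreach_i
  have hrm_rg : InRg n rm := reach_InRg hInv hnumrg hreach_num
  have hri_root : IsRootP ps ri := reach_root hreach_i
  have hrm_root : IsRootP ps rm := reach_root hreach_num
  have hPI2 : PInvA n threshold (i+1) fb.2 := hfb_pi _ (hfa_pi _ hPI)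
  have hreach2 : ∀ v, InRg n v → ∀ rr, (ReachP fb.2 v rr ↔ ReachP ps v rr) := by
    intro v hv rr
    exact (hfb_reach v hv rr).trans (hfa_reach v hv rr)
  have hroot2 : ∀ x, InRg n x → (IsRootP fb.2 x ↔ IsRootP ps x) := by
    intro x hx
    exact (hfb_root x hx).trans (hfa_root x hx)
  have hciRel := hRel i num hirg hnumrg
  -- roots determine labels
  have hlabel : ∀ u, InRg n u → ∀ ru, ReachP ps u ru →
      ∀ w, InRg n w → ∀ rw, ReachP ps w rw →
      (PySem.List.pyGetD comp u 0 = PySem.List.pyGetD comp w 0 ↔ ru = rw) := by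
    intro u hu ru hru w hw rw hrw
    rw [← hRel u w hu hw, sameC_iff_roots hru hrw]
  by_cases heq : ri = rm
  · -- already in the same class: both sides do nothing
    have hsame : SameC ps i num := ⟨ri, hreach_i, heq ▸ hreach_num⟩
    have hlab : PySem.List.pyGetD comp i 0 = PySem.List.pyGetD comp num 0 := hciRel.mp hsame
    have hA : unionStepA fuel i ps num = fb.2 := by
      simp only [unionStepA, ← hfa_def, ← hfb_def, ← hri_def, ← hrm_def, heq]
      simp
    rw [hA]
    have hlenA : fb.2.length = ps.length := by rw [hfb_len, hfa_len]
    refine ⟨hfb_inv, hPI2, hlenA, ?_⟩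
    simp only [recolorStepB, hlab]
    simp only [ne_eq, not_true_eq_false, if_false]
    refine ⟨hclen, relAB_transfer hreach2 hRel, fun u v _ _ h => h, hlab⟩
  · -- genuine union: A reparents root ri onto rm, B recolours class of num into class of i
    have hri_root2 : IsRootP fb.2 ri := (hroot2 ri hri_rg).mpr hri_root
    have hrm_root2 : IsRootP fb.2 rm := (hroot2 rm hrm_rg).mpr hrm_root
    have hlab : PySem.List.pyGetD comp i 0 ≠ PySem.List.pyGetD comp num 0 := fun h =>
      heq ((hlabel i hirg ri hreach_i num hnumrg rm hreach_num).mp h)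
    obtain ⟨hInv3, hlen3, hreach3, hnotrootA, hroot3, hstepA, hstepNe⟩ :=
      reroot_facts (n := n) hfb_inv hri_rg hrm_rg hri_root2 hrm_root2 heq
    have hA : unionStepA fuel i ps num = PySem.List.pySetD fb.2 ri rm := by
      simp only [unionStepA, ← hfa_def, ← hfb_def, ← hri_def, ← hrm_def, ne_eq, heq,
        not_false_iff, if_true]
    rw [hA]
    set ps' := PySem.List.pySetD fb.2 ri rm with hps'_def
    have hlenA : ps'.length = ps.length := by rw [hlen3, hfb_len, hfa_len]
    have hgoalB : True := trivial
    refine ⟨hInv3, ?_, hlenA, ?_⟩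
    · -- PInvA is maintained: the new non-root ri and its parent rm both have a divisor ≤ i
      have hPdiv_ri : Pdiv threshold (i+1) ri := by
        by_cases hii : ri = i
        · exact ⟨i, hi1, by omega, hii ▸ dvd_refl i⟩
        · have hnri : ¬ IsRootP fb.2 i := by
            intro hroot
            exact hii (reach_unique ((hreach2 i hirg ri).mpr hreach_i) (reach_self hroot))
          obtain ⟨t, he, hrr⟩ := (hreach2 i hirg ri).mpr hreach_i
          obtain ⟨w, hwrg, hwnr, hwst⟩ := reach_last_step hfb_inv t i ri hirg hnri he hrr
          exact hwst ▸ (hPI2 w hwrg hwnr).2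
      have hPdiv_rm : Pdiv threshold (i+1) rm := by
        by_cases hmm : rm = num
        · exact ⟨i, hi1, by omega, hmm ▸ hdvd⟩
        · have hnrn : ¬ IsRootP fb.2 num := by
            intro hroot
            exact hmm (reach_unique ((hreach2 num hnumrg rm).mpr hreach_num) (reach_self hroot))
          obtain ⟨t, he, hrr⟩ := (hreach2 num hnumrg rm).mpr hreach_num
          obtain ⟨w, hwrg, hwnr, hwst⟩ := reach_last_step hfb_inv t num rm hnumrg hnrn he hrr
          exact hwst ▸ (hPI2 w hwrg hwnr).2
      intro v hv hnr'
      by_cases hvri : v = ri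
      · subst hvri
        exact ⟨hPdiv_ri, hstepA ▸ hPdiv_rm⟩
      · have hnr2 : ¬ IsRootP fb.2 v := fun h => hnr' ((hroot3 v hv hvri).mpr h)
        have hold := hPI2 v hv hnr2
        rw [hstepNe v hv.1 hvri]
        exact hold
    · -- the label side
      simp only [recolorStepB, ne_eq, hlab, not_false_iff, if_true]
      set cn := PySem.List.pyGetD comp num 0 with hcn_def
      set ci := PySem.List.pyGetD comp i 0 with hci_def
      set g : Int → Int := fun c => if c = cn then ci else c with hg_def
      have hread : ∀ x : Int, InRg n x →
          PySem.List.pyGetD (comp.map g) x 0 = g (PySem.List.pyGetD comp x 0) := by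
        intro x hx
        exact pyGetD_map_read comp g hx.1 (by have h1 := hx.2; rw [hclen]; omega)
      refine ⟨by simp [hclen], ?_, ?_, ?_⟩
      · -- RelAB for the merged state
        intro u v hu hv
        obtain ⟨ru, hru⟩ := hInv.2.2 u hu
        obtain ⟨rv, hrv⟩ := hInv.2.2 v hv
        have hu2 : ReachP fb.2 u ru := (hreach2 u hu ru).mpr hru
        have hv2 : ReachP fb.2 v rv := (hreach2 v hv rv).mpr hrv
        have hsc : SameC ps' u v ↔
            (if ru = ri then rm else ru) = (if rv = ri then rm else rv) := by
          constructor
          · rintro ⟨r, h1, h2⟩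
            obtain ⟨r0, hr0, hrf⟩ := (hreach3 u r hu).mp h1
            obtain ⟨r1, hr1, hrf1⟩ := (hreach3 v r hv).mp h2
            rw [reach_unique hr0 hu2] at hrf
            rw [reach_unique hr1 hv2] at hrf1
            rw [← hrf, ← hrf1]
          · intro h
            refine ⟨if ru = ri then rm else ru,
              (hreach3 u _ hu).mpr ⟨ru, hu2, rfl⟩,
              (hreach3 v _ hv).mpr ⟨rv, hv2, h⟩⟩
        rw [hsc, hread u hu, hread v hv, hg_def]
        rw [squash_iff cn ci, squash_iff ri rm ru rv]
        rw [hlabel u hu ru hru v hv rv hrv,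
            hlabel u hu ru hru num hnumrg rm hreach_num,
            hlabel v hv rv hrv i hirg ri hreach_i,
            hlabel u hu ru hru i hirg ri hreach_i,
            hlabel v hv rv hrv num hnumrg rm hreach_num]
        tauto
      · -- equal labels stay equal after recoloring
        intro u v hu hv h
        rw [hread u hu, hread v hv, h]
      · -- i and num now carry the same label
        rw [hread i hirg, hread num hnumrg, hg_def]
        simp [← hci_def, ← hcn_def]

-- ---- the inner loop over all multiples of an executed base i, in lockstep ----
theorem inner_exec {n threshold : Int} {fuel : Nat} {i : Int}
    (hfuel : fuel = (n+1).toNat) (hthr : 0 ≤ threshold) (hi1 : threshold < i) (hin : i < n) :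
    ∀ (L : List Int) (ps comp : List Int),
    (∀ num ∈ L, i ∣ num ∧ 2*i ≤ num ∧ num ≤ n) →
    InvA n ps → PInvA n threshold (i+1) ps → comp.length = (n+1).toNat → RelAB n ps comp →
    InvA n (L.foldl (unionStepA fuel i) ps) ∧
    PInvA n threshold (i+1) (L.foldl (unionStepA fuel i) ps) ∧
    (L.foldl (recolorStepB i) comp).length = (n+1).toNat ∧
    RelAB n (L.foldl (unionStepA fuel i) ps) (L.foldl (recolorStepB i) comp) ∧
    (∀ u v, InRg n u → InRg n v → PySem.List.pyGetD comp u 0 = PySem.List.pyGetD comp v 0 →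
       PySem.List.pyGetD (L.foldl (recolorStepB i) comp) u 0 =
       PySem.List.pyGetD (L.foldl (recolorStepB i) comp) v 0) ∧
    (∀ num ∈ L, PySem.List.pyGetD (L.foldl (recolorStepB i) comp) i 0 =
       PySem.List.pyGetD (L.foldl (recolorStepB i) comp) num 0) := by
  intro L
  induction L with
  | nil =>
    intro ps comp _ hInv hPI hclen hRel
    exact ⟨hInv, hPI, hclen, hRel, fun u v _ _ h => h, fun num h => absurd h (List.not_mem_nil)⟩
  | cons num L ih =>
    intro ps comp hmem hInv hPI hclen hRel
    obtain ⟨hdvd, h2i, hnum⟩ := hmem num (List.mem_cons_self)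
    obtain ⟨hInv1, hPI1, hlen1, hclen1, hRel1, hmono1, heq1⟩ :=
      edge_step (num := num) (comp := comp) hfuel hthr hi1 hin hdvd h2i hnum hInv hPI hclen hRel
    simp only [List.foldl_cons]
    obtain ⟨hInv2, hPI2, hclen2, hRel2, hmono2, heq2⟩ :=
      ih (unionStepA fuel i ps num) (recolorStepB i comp num)
        (fun m hm => hmem m (List.mem_cons_of_mem _ hm)) hInv1 hPI1 hclen1 hRel1
    have hirg : InRg n i := ⟨by omega, by omega⟩
    have hnumrg : InRg n num := ⟨by omega, hnum⟩
    refine ⟨hInv2, hPI2, hclen2, hRel2, ?_, ?_⟩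
    · intro u v hu hv h
      exact hmono2 u v hu hv (hmono1 u v hu hv h)
    · intro m hm
      rcases List.mem_cons.mp hm with rfl | hm'
      · exact hmono2 i m hirg hnumrg heq1
      · exact heq2 m hm'

theorem dvd_two_le {j i : Int} (hj : 0 < j) (hd : j ∣ i) (hlt : j < i) : 2*j ≤ i := by
  obtain ⟨c, rfl⟩ := hd
  have hc : 1 < c := by nlinarith
  nlinarith

-- label equality that a skipped base would have re-derived
theorem skip_label_eq {n threshold lo : Int} {comp : List Int}
    (hthr : 0 ≤ threshold) (hlo : threshold < lo) (hlon : lo ≤ n)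
    (hj : Pdiv threshold lo lo) (hM : MInvB n threshold lo comp) :
    ∀ m, lo ∣ m → 2*lo ≤ m → m ≤ n →
    PySem.List.pyGetD comp lo 0 = PySem.List.pyGetD comp m 0 := by
  obtain ⟨j, hj1, hj2, hjd⟩ := hj
  intro m hdvd h2 hm
  have hj0 : 0 < j := by omega
  have h1 : PySem.List.pyGetD comp j 0 = PySem.List.pyGetD comp lo 0 :=
    hM j lo hj1 hj2 hjd (dvd_two_le hj0 hjd hj2) hlon
  have h2' : PySem.List.pyGetD comp j 0 = PySem.List.pyGetD comp m 0 := by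
    refine hM j m hj1 hj2 (hjd.trans hdvd) ?_ hm
    have : j < m := by omega
    exact le_trans (by omega) h2
  rw [← h1, h2']

-- for a skipped base the whole recoloring loop is a no-op
theorem inner_skip {n threshold lo : Int}
    (hthr : 0 ≤ threshold) (hlo : threshold < lo) (hlon : lo ≤ n)
    (hj : Pdiv threshold lo lo) :
    ∀ (L : List Int) (comp : List Int),
    (∀ num ∈ L, lo ∣ num ∧ 2*lo ≤ num ∧ num ≤ n) →
    MInvB n threshold lo comp →
    L.foldl (recolorStepB lo) comp = comp := by
  intro L
  induction L with
  | nil => intro comp _ _; rfl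
  | cons num L ih =>
    intro comp hmem hM
    obtain ⟨hdvd, h2, hm⟩ := hmem num (List.mem_cons_self)
    have heq : PySem.List.pyGetD comp lo 0 = PySem.List.pyGetD comp num 0 :=
      skip_label_eq hthr hlo hlon hj hM num hdvd h2 hm
    have hstep : recolorStepB lo comp num = comp := by
      simp only [recolorStepB, heq]
      simp
    simp only [List.foldl_cons, hstep]
    exact ih comp (fun m hmm => hmem m (List.mem_cons_of_mem _ hmm)) hM

theorem mem_multiples {n i num : Int} (hi : 0 < i)
    (h : num ∈ PySem.List.pyRange (2*i) (n+1) i) : i ∣ num ∧ 2*i ≤ num ∧ num ≤ n := by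
  obtain ⟨h1, h2, h3⟩ := (PySem.List.mem_pyRange_iff_of_pos hi num).mp h
  refine ⟨?_, h1, by omega⟩
  have : num = (num - 2*i) + 2*i := by ring
  rw [this]
  exact dvd_add h3 ⟨2, by ring⟩

theorem multiples_mem {n i num : Int} (hi : 0 < i)
    (hdvd : i ∣ num) (h2 : 2*i ≤ num) (hn : num ≤ n) :
    num ∈ PySem.List.pyRange (2*i) (n+1) i := by
  refine (PySem.List.mem_pyRange_iff_of_pos hi num).mpr ⟨h2, by omega, ?_⟩
  exact dvd_sub hdvd ⟨2, by ring⟩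

theorem pdiv_mono {threshold b b' v : Int} (h : b ≤ b') (hp : Pdiv threshold b v) :
    Pdiv threshold b' v := by
  obtain ⟨j, h1, h2, h3⟩ := hp
  exact ⟨j, h1, by omega, h3⟩

theorem pinv_mono {n threshold b b' : Int} {ps : List Int} (h : b ≤ b')
    (hp : PInvA n threshold b ps) : PInvA n threshold b' ps := by
  intro v hv hnr
  exact ⟨pdiv_mono h (hp v hv hnr).1, pdiv_mono h (hp v hv hnr).2⟩

-- ---- the outer loop over all bases, in lockstep ----
theorem outer_fold {n threshold : Int} {fuel : Nat}
    (hfuel : fuel = (n+1).toNat) (hthr : 0 ≤ threshold) :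
    ∀ (k : Nat) (lo : Int) (ps comp : List Int), (n - lo).toNat = k → threshold < lo →
    InvA n ps → PInvA n threshold lo ps → comp.length = (n+1).toNat →
    MInvB n threshold lo comp → RelAB n ps comp →
    InvA n ((PySem.List.pyRange lo n 1).foldl (baseStepA fuel n) ps) ∧
    RelAB n ((PySem.List.pyRange lo n 1).foldl (baseStepA fuel n) ps)
      ((PySem.List.pyRange lo n 1).foldl
        (fun comp i => (PySem.List.pyRange (2*i) (n+1) i).foldl (recolorStepB i) comp) comp) := by
  intro k
  induction k with
  | zero =>
    intro lo ps comp hk hlo hInv hPI hclen hM hRel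
    rw [PySem.List.pyRange_one_eq_nil (by omega)]
    exact ⟨hInv, hRel⟩
  | succ k ih =>
    intro lo ps comp hk hlo hInv hPI hclen hM hRel
    have hlon : lo < n := by omega
    have hlo0 : 0 < lo := by omega
    have hlorg : InRg n lo := ⟨by omega, by omega⟩
    rw [PySem.List.pyRange_one_cons (by omega)]
    simp only [List.foldl_cons]
    obtain ⟨w, hw, hwr⟩ := hInv.2.1 lo hlorg
    have hmem : ∀ num ∈ PySem.List.pyRange (2*lo) (n+1) lo,
        lo ∣ num ∧ 2*lo ≤ num ∧ num ≤ n := fun num h => mem_multiples hlo0 h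
    by_cases hwi : w = lo
    · -- executed base
      have hw' : PySem.List.pyGet? ps lo = some lo := hwi ▸ hw
      have hbody : baseStepA fuel n ps lo =
          (PySem.List.pyRange (2*lo) (n+1) lo).foldl (unionStepA fuel lo) ps := by
        simp [baseStepA, hw']
      rw [hbody]
      obtain ⟨hInv1, hPI1, hclen1, hRel1, hmono1, heq1⟩ :=
        inner_exec hfuel hthr hlo hlon (PySem.List.pyRange (2*lo) (n+1) lo) ps comp hmem
          hInv (pinv_mono (by omega) hPI) hclen hRel
      set comp1 := (PySem.List.pyRange (2*lo) (n+1) lo).foldl (recolorStepB lo) comp with hcomp1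
      have hM1 : MInvB n threshold (lo+1) comp1 := by
        intro j m hj1 hj2 hjd h2j hm
        by_cases hjlo : j = lo
        · subst hjlo
          exact heq1 m (multiples_mem hlo0 hjd h2j hm)
        · have hjrg : InRg n j := ⟨by omega, by omega⟩
          have hmrg : InRg n m := ⟨by omega, hm⟩
          exact hmono1 j m hjrg hmrg (hM j m hj1 (by omega) hjd h2j hm)
      exact ih (lo+1) _ comp1 (by omega) (by omega) hInv1 hPI1 hclen1 hM1 hRel1
    · -- skipped base: A does nothing, B's recoloring is a no-op
      have hnr : ¬ IsRootP ps lo := by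
        intro h; rw [IsRootP] at h; rw [h] at hw; exact hwi (Option.some.inj hw).symm
      have hbody : baseStepA fuel n ps lo = ps := by
        simp [baseStepA, hw, hwi]
      have hj : Pdiv threshold lo lo := (hPI lo hlorg hnr).1
      have hskip : (PySem.List.pyRange (2*lo) (n+1) lo).foldl (recolorStepB lo) comp = comp :=
        inner_skip hthr hlo (by omega) hj _ comp hmem hM
      rw [hbody, hskip]
      have hM1 : MInvB n threshold (lo+1) comp := by
        intro j m hj1 hj2 hjd h2j hm
        by_cases hjlo : j = lo
        · subst hjlo
          exact skip_label_eq hthr hlo (by omega) hj hM m hjd h2j hm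
        · exact hM j m hj1 (by omega) hjd h2j hm
      exact ih (lo+1) ps comp (by omega) (by omega) hInv (pinv_mono (by omega) hPI) hclen hM1 hRel

-- ---- the initial state ----
theorem init_get {n v : Int} (hv : InRg n v) :
    PySem.List.pyGet? (PySem.List.pyRange 0 (n+1) 1) v = some v := by
  rw [PySem.List.pyGet?_of_nonneg _ hv.1, PySem.List.getElem?_pyRange_one]
  have h1 := hv.1
  have h2 := hv.2
  rw [if_pos (by omega)]
  congr 1
  omega

theorem init_getD {n v : Int} (hv : InRg n v) :
    PySem.List.pyGetD (PySem.List.pyRange 0 (n+1) 1) v 0 = v := by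
  have h1 := hv.1
  have h2 := hv.2
  have hlen : ((PySem.List.pyRange 0 (n+1) 1).length : Int) = n + 1 := by
    rw [PySem.List.length_pyRange_one]; omega
  rw [PySem.List.pyGetD_eq_getElem _ _ hv.1 (by omega)]
  rw [PySem.List.getElem_pyRange_one]
  omega

theorem init_state (n threshold : Int) :
    InvA n (PySem.List.pyRange 0 (n+1) 1) ∧
    PInvA n threshold (threshold+1) (PySem.List.pyRange 0 (n+1) 1) ∧
    (PySem.List.pyRange 0 (n+1) 1).length = (n+1).toNat ∧
    MInvB n threshold (threshold+1) (PySem.List.pyRange 0 (n+1) 1) ∧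
    RelAB n (PySem.List.pyRange 0 (n+1) 1) (PySem.List.pyRange 0 (n+1) 1) := by
  have hroot : ∀ v, InRg n v → IsRootP (PySem.List.pyRange 0 (n+1) 1) v :=
    fun v hv => init_get hv
  refine ⟨⟨?_, ?_, ?_⟩, ?_, ?_, ?_, ?_⟩
  · rw [PySem.List.length_pyRange_one]; congr 1; omega
  · exact fun v hv => ⟨v, init_get hv, hv⟩
  · exact fun v hv => ⟨v, reach_self (hroot v hv)⟩
  · exact fun v hv hnr => absurd (hroot v hv) hnr
  · rw [PySem.List.length_pyRange_one]; congr 1; omega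
  · intro j m hj1 hj2; omega
  · intro u v hu hv
    rw [sameC_iff_roots (reach_self (hroot u hu)) (reach_self (hroot v hv)),
        init_getD hu, init_getD hv]

-- ---- the query loop ----
theorem query_fold {n threshold : Int} {fuel : Nat} (hfuel : fuel = (n+1).toNat) :
    ∀ (qs : List (List Int)) (ps comp : List Int) (ans : List Bool),
    InvA n ps → RelAB n ps comp →
    (∀ q ∈ qs, q.length = 2 ∧ ∀ x ∈ q, 0 ≤ x ∧ x ≤ n) →
    (qs.foldl (queryStepA fuel) (ps, ans)).2 = ans ++ qs.map (answerB comp) := by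
  intro qs
  induction qs with
  | nil => intro ps comp ans _ _ _; simp
  | cons q qs ih =>
    intro ps comp ans hInv hRel hq
    obtain ⟨hqlen, hqrg⟩ := hq q (List.mem_cons_self)
    match q, hqlen with
    | [a, b], _ =>
      have harg : InRg n a := by
        have := hqrg a (by simp)
        exact ⟨this.1, this.2⟩
      have hbrg : InRg n b := by
        have := hqrg b (by simp)
        exact ⟨this.1, this.2⟩
      obtain ⟨hfa_r, hfa_inv, hfa_len, hfa_reach, hfa_root, _⟩ :=
        findA_full (n := n) threshold hfuel hInv harg
      obtain ⟨hfb_r, hfb_inv, hfb_len, hfb_reach, hfb_root, _⟩ :=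
        findA_full (n := n) threshold hfuel hfa_inv hbrg
      set fa := findA fuel ps a with hfa_def
      set fb := findA fuel fa.2 b with hfb_def
      have hreach_b : ReachP ps b fb.1 := (hfa_reach b hbrg fb.1).mp hfb_r
      have hiff : (fa.1 = fb.1) ↔
          (PySem.List.pyGetD comp a 0 = PySem.List.pyGetD comp b 0) := by
        rw [← sameC_iff_roots hfa_r hreach_b]
        exact hRel a b harg hbrg
      have hans : answerB comp [a, b]
          = decide (PySem.List.pyGetD comp a 0 = PySem.List.pyGetD comp b 0) := rfl
      have hstep : queryStepA fuel (ps, ans) [a, b] =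
          (fb.2, ans ++ [decide (fa.1 = fb.1)]) := by
        simp [queryStepA, ← hfa_def, ← hfb_def]
      have hreach2 : ∀ v, InRg n v → ∀ rr, (ReachP fb.2 v rr ↔ ReachP ps v rr) := by
        intro v hv rr
        exact (hfb_reach v hv rr).trans (hfa_reach v hv rr)
      have := ih fb.2 comp (ans ++ [decide (fa.1 = fb.1)]) hfb_inv
        (relAB_transfer hreach2 hRel)
        (fun q' hq' => hq q' (List.mem_cons_of_mem _ hq'))
      have hdec : decide (fa.1 = fb.1)
          = decide (PySem.List.pyGetD comp a 0 = PySem.List.pyGetD comp b 0) :=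
        decide_eq_decide.mpr hiff
      simp only [List.foldl_cons, hstep, this, List.map_cons, hans]
      rw [hdec]
      simp

-- ===== VERDICT (by name: the statement is the Claim_ definition above) =====
theorem areConnected_spec : Claim_equal_areConnected := by
  unfold Claim_equal_areConnected Spec_areConnected
  intro n threshold queries _ hpre
  obtain ⟨hthr, hq⟩ := hpre
  by_cases hqnil : queries = []
  · subst hqnil
    simp [areConnected, areConnected_alt]
  · have hn : 0 ≤ n := by
      obtain ⟨q, hqmem⟩ := List.exists_mem_of_ne_nil queries hqnil
      obtain ⟨hlen, hrg⟩ := hq q hqmem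
      match q, hlen with
      | [a, b], _ =>
        have := hrg a (by simp)
        omega
    simp only [areConnected, areConnected_alt]
    have hfuel : (PySem.List.pyRange 0 (n+1) 1).length = (n+1).toNat := by
      rw [PySem.List.length_pyRange_one]; congr 1; omega
    obtain ⟨hInv0, hPI0, hclen0, hM0, hRel0⟩ := init_state n threshold
    obtain ⟨hInvF, hRelF⟩ :=
      outer_fold (n := n) hfuel hthr (n - (threshold+1)).toNat (threshold+1)
        (PySem.List.pyRange 0 (n+1) 1) (PySem.List.pyRange 0 (n+1) 1)
        rfl (by omega) hInv0 hPI0 hclen0 hM0 hRel0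
    exact query_fold (threshold := threshold) hfuel queries _ _ [] hInvF hRelF hq
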